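-- pv_equiv track=rewrite | github.com/zhuilie123/MIDI | MIDI.py | compress_sequence
-- ===== SOURCE A (Python) =====
-- WORKSHOP_CHARSET = "0¢£¤¥¦§¨©ª«¬®¯°±²³´µ¶·¸¹º»¼½¾¿ÀÁÂÃÄÅÆÇÈÉÊËÌÍÎÏÐÑÒÓÔÕÖ×ØÙÚÛÜÝÞßàáâãäåæçèéêëìíîïðñòóôõö÷øùúûüýþÿĀāĂăĄąĆćĈĉĊċČčĎďĐđĒēĔĕĖėĘęĚěĜĝĞğĠġ"
--
-- def compress_sequence(sequence):
--     """压缩序列"""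
--     compressed_strings = []
--     debug_info = []
--     current_string = ""
--
--     for value in sequence:
--         # 因为合并后的数字已经很大，我们使用原始值
--         scaled_value = int(value)
--
--         # 使用128进制编码
--         digits = []
--         num = scaled_value
--
--         if num == 0:
--             digits = [0]
--         else:
--             while num > 0:
--                 digit = num % 128
--                 digits.append(digit)
--                 num = num // 128
--
--         digits.reverse()
--         component_chars = [WORKSHOP_CHARSET[d] for d in digits]
--         component_str = ''.join(component_chars)
--
--         # 不需要填充，因为合并后的数字长度不一
--         debug_info.append((value, scaled_value, component_str))
--
--         if len(current_string) + len(component_str) <= 128: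
--             current_string += component_str
--         else:
--             compressed_strings.append(current_string)
--             current_string = component_str
--
--     if current_string:
--         compressed_strings.append(current_string)
--
--     return compressed_strings, debug_info
-- ===== SOURCE B (Python) =====
-- WORKSHOP_CHARSET = "0¢£¤¥¦§¨©ª«¬®¯°±²³´µ¶·¸¹º»¼½¾¿ÀÁÂÃÄÅÆÇÈÉÊËÌÍÎÏÐÑÒÓÔÕÖ×ØÙÚÛÜÝÞßàáâãäåæçèéêëìíîïðñòóôõö÷øùúûüýþÿĀāĂăĄąĆćĈĉĊċČčĎďĐđĒēĔĕĖėĘęĚěĜĝĞğĠġ"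
--
--
-- def _enc(n):
--     """Recursive base-128 encoder: most-significant digit first, no list, no reverse."""
--     if n <= 0:
--         return ""
--     return _enc(n // 128) + WORKSHOP_CHARSET[n % 128]
--
--
-- def compress_sequence(sequence):
--     # pass 1: encode every value (recursively, front-to-back)
--     components = [WORKSHOP_CHARSET[0] if int(v) == 0 else _enc(int(v)) for v in sequence]
--     debug_info = [(v, int(v), c) for v, c in zip(sequence, components)]
--
--     # pass 2: group the components into runs whose total length stays <= 128,
--     # tracking only the running length; strings are joined per group at the end
--     groups = []
--     cur = []
--     cur_len = 0
--     for c in components: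
--         if cur_len + len(c) <= 128:
--             cur.append(c)
--             cur_len += len(c)
--         else:
--             groups.append(cur)
--             cur, cur_len = [c], len(c)
--     if cur_len:
--         groups.append(cur)
--     chunks = [''.join(g) for g in groups]
--     return chunks, debug_info
-- ===== Notes on version B (the rewrite author's own statement) =====
-- stated objective: alternative
-- what changed: A fuses everything into one loop that extracts base-128 digits low-to-high into a list, reverses it, and grows chunk strings by concatenation; B encodes each value with a recursive most-significant-digit-first encoder (no digit list, no reverse), then a separate numeric pass groups the component strings by running length only (no string building), and chunks are produced by joining each group at the end.
import Mathlib
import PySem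

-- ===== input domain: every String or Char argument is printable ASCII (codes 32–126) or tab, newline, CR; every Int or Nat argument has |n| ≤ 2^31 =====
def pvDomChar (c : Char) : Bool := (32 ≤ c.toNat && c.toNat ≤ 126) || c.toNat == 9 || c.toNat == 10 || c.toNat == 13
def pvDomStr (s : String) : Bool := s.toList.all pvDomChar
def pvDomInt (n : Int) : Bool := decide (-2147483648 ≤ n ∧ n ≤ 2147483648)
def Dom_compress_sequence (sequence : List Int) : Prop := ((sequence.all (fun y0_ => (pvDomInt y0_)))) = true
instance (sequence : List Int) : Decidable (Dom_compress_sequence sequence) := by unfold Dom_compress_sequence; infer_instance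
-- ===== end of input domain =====

-- B replaces A's fused loop (digit list + reverse + chunk strings grown by concatenation) by a
-- recursive MSB-first encoder plus a length-only grouping pass with per-group joins at the end;
-- objective: alternative decomposition (same cost). Strings are ported as List Char with String.mk at the boundaries.

def pvCharset : List Char :=
  ['0', '¢', '£', '¤', '¥', '¦', '§', '¨', '©', 'ª', '«', '¬', '®', '¯', '°', '±', '²', '³', '´', 'µ', '¶', '·', '¸', '¹', 'º', '»', '¼', '½', '¾', '¿', 'À', 'Á', 'Â', 'Ã', 'Ä', 'Å', 'Æ', 'Ç', 'È', 'É', 'Ê', 'Ë', 'Ì', 'Í', 'Î', 'Ï', 'Ð', 'Ñ', 'Ò', 'Ó', 'Ô', 'Õ', 'Ö', '×', 'Ø', 'Ù', 'Ú', 'Û', 'Ü', 'Ý', 'Þ', 'ß', 'à', 'á', 'â', 'ã', 'ä', 'å', 'æ', 'ç', 'è', 'é', 'ê', 'ë', 'ì', 'í', 'î', 'ï', 'ð', 'ñ', 'ò', 'ó', 'ô', 'õ', 'ö', '÷', 'ø', 'ù', 'ú', 'û', 'ü', 'ý', 'þ', 'ÿ', 'Ā', 'ā', 'Ă', 'ă',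 'Ą', 'ą', 'Ć', 'ć', 'Ĉ', 'ĉ', 'Ċ', 'ċ', 'Č', 'č', 'Ď', 'ď', 'Đ', 'đ', 'Ē', 'ē', 'Ĕ', 'ĕ', 'Ė', 'ė', 'Ę', 'ę', 'Ě', 'ě', 'Ĝ', 'ĝ', 'Ğ', 'ğ', 'Ġ', 'ġ']

def pvCharOf (d : Int) : Char := (PySem.List.pyGet? pvCharset d).getD '0'

-- ===== PORT A =====
-- while num > 0: digits.append(num % 128); num //= 128   (digits in low-to-high order, reversed afterwards)
def pvDigitsA (num : Int) : List Int :=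
  if h : 0 < num then PySem.Int.mod num 128 :: pvDigitsA (PySem.Int.floordiv num 128) else []
termination_by num.toNat
decreasing_by
  rw [PySem.Int.floordiv_eq_ediv_of_pos (by omega)]
  omega

-- one iteration of A's loop body over the state (compressed_strings, debug_info, current_string)
def pvStepA (st : List String × List (Int × Int × String) × List Char) (value : Int) :
    List String × List (Int × Int × String) × List Char :=
  let scaled := value                      -- int(value)
  let digits := if scaled = 0 then [(0 : Int)] else (pvDigitsA scaled).reverse
  let component := digits.map pvCharOf
  let debug' := st.2.1 ++ [(value, scaled, String.mk component)]
  if st.2.2.length + component.length ≤ 128 then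
    (st.1, debug', st.2.2 ++ component)
  else
    (st.1 ++ [String.mk st.2.2], debug', component)

def compress_sequence (sequence : List Int) : List String × (List (Int × Int × String)) :=
  let st := sequence.foldl pvStepA ([], [], []);
  (if st.2.2 ≠ [] then st.1 ++ [String.mk st.2.2] else st.1, st.2.1)

-- ===== PORT B =====
-- def _enc(n): if n <= 0: return "";  return _enc(n // 128) + WORKSHOP_CHARSET[n % 128]
def pvEnc (n : Int) : List Char :=
  if h : 0 < n then pvEnc (PySem.Int.floordiv n 128) ++ [pvCharOf (PySem.Int.mod n 128)] else []
termination_by n.toNat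
decreasing_by
  rw [PySem.Int.floordiv_eq_ediv_of_pos (by omega)]
  omega

def pvComponentB (v : Int) : List Char :=
  if v = 0 then [pvCharOf 0] else pvEnc v

-- one iteration of B's grouping pass over the state (groups, cur, cur_len)
def pvGroupStep (st : List (List (List Char)) × List (List Char) × Nat) (c : List Char) :
    List (List (List Char)) × List (List Char) × Nat :=
  if st.2.2 + c.length ≤ 128 then (st.1, st.2.1 ++ [c], st.2.2 + c.length)
  else (st.1 ++ [st.2.1], [c], c.length)

def compress_sequence_alt (sequence : List Int) : List String × (List (Int × Int × String)) :=
  let components := sequence.map pvComponentB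
  let debug := (sequence.zip components).map (fun p => (p.1, p.1, String.mk p.2))
  let st := components.foldl pvGroupStep ([], [], 0)
  let groups := if st.2.2 ≠ 0 then st.1 ++ [st.2.1] else st.1
  (groups.map (fun g => String.mk g.flatten), debug)

-- ===== PRECONDITION & SPEC =====
def Spec_compress_sequence (sequence : List Int) (out : List String × (List (Int × Int × String))) : Prop := out = compress_sequence_alt sequence
instance (sequence : List Int) (out : List String × (List (Int × Int × String))) : Decidable (Spec_compress_sequence sequence out) := by unfold Spec_compress_sequence; infer_instance

-- ===== CLAIM (what is proved, stated in full; the proofs are below) =====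
def Claim_equal_compress_sequence : Prop := ∀ (sequence : List Int), Dom_compress_sequence sequence → Spec_compress_sequence sequence (compress_sequence sequence)

-- ===== LEMMAS AND PROOFS =====

-- B's MSB-first recursive encoder produces exactly A's reversed digit list through the charset
theorem pvEnc_eq (n : Int) :
    pvEnc n = (pvDigitsA n).reverse.map pvCharOf := by
  induction n using pvEnc.induct with
  | case1 n h ih =>
      rw [pvEnc, dif_pos h, ih]
      conv_rhs => rw [pvDigitsA, dif_pos h]
      simp
  | case2 n h =>
      rw [pvEnc, dif_neg h]
      conv_rhs => rw [pvDigitsA, dif_neg h]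
      simp

theorem pvComponentB_eq (v : Int) :
    pvComponentB v = (if v = 0 then [(0 : Int)] else (pvDigitsA v).reverse).map pvCharOf := by
  unfold pvComponentB
  by_cases h0 : v = 0
  · simp [h0]
  · rw [if_neg h0, if_neg h0, pvEnc_eq]

-- fold fusion: A's single fused loop equals B's encode pass followed by B's grouping pass
theorem fold_fusion (s : List Int) (groups : List (List (List Char)))
    (debug : List (Int × Int × String)) (cur : List (List Char)) :
    s.foldl pvStepA (groups.map (fun g => String.mk g.flatten), debug, cur.flatten) =
      (((s.map pvComponentB).foldl pvGroupStep (groups, cur, cur.flatten.length)).1.map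
          (fun g => String.mk g.flatten),
       debug ++ (s.zip (s.map pvComponentB)).map (fun p => (p.1, p.1, String.mk p.2)),
       ((s.map pvComponentB).foldl pvGroupStep (groups, cur, cur.flatten.length)).2.1.flatten) := by
  induction s generalizing groups debug cur with
  | nil => simp
  | cons v t ih =>
      simp only [List.foldl_cons, List.map_cons, List.zip_cons_cons, List.map_cons]
      rw [show pvStepA (groups.map (fun g => String.mk g.flatten), debug, cur.flatten) v =
            (if cur.flatten.length + (pvComponentB v).length ≤ 128 then
              (groups.map (fun g => String.mk g.flatten),
               debug ++ [(v, v, String.mk (pvComponentB v))], cur.flatten ++ pvComponentB v)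
            else
              (groups.map (fun g => String.mk g.flatten) ++ [String.mk cur.flatten],
               debug ++ [(v, v, String.mk (pvComponentB v))], pvComponentB v))
          from by rw [pvStepA, pvComponentB_eq]]
      by_cases hfit : cur.flatten.length + (pvComponentB v).length ≤ 128
      · rw [if_pos hfit,
            show pvGroupStep (groups, cur, cur.flatten.length) (pvComponentB v) =
              (groups, cur ++ [pvComponentB v], cur.flatten.length + (pvComponentB v).length)
            from by dsimp only [pvGroupStep]; rw [if_pos hfit]]
        have h := ih groups (debug ++ [(v, v, String.mk (pvComponentB v))]) (cur ++ [pvComponentB v])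
        simp only [List.flatten_append, List.flatten_cons, List.flatten_nil, List.append_nil,
          List.length_append] at h
        rw [h]
        simp
      · rw [if_neg hfit,
            show pvGroupStep (groups, cur, cur.flatten.length) (pvComponentB v) =
              (groups ++ [cur], [pvComponentB v], (pvComponentB v).length)
            from by dsimp only [pvGroupStep]; rw [if_neg hfit]]
        have h := ih (groups ++ [cur]) (debug ++ [(v, v, String.mk (pvComponentB v))]) [pvComponentB v]
        simp only [List.flatten_cons, List.flatten_nil, List.append_nil, List.map_append,
          List.map_cons, List.map_nil] at h
        rw [h]
        simp
-- the grouping fold preserves "third slot = length of flattened second slot"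
theorem groupFold_len (cs : List (List Char)) (groups : List (List (List Char)))
    (cur : List (List Char)) :
    (cs.foldl pvGroupStep (groups, cur, cur.flatten.length)).2.2 =
      (cs.foldl pvGroupStep (groups, cur, cur.flatten.length)).2.1.flatten.length := by
  induction cs generalizing groups cur with
  | nil => simp
  | cons c t ih =>
      simp only [List.foldl_cons]
      by_cases hfit : cur.flatten.length + c.length ≤ 128
      · rw [show pvGroupStep (groups, cur, cur.flatten.length) c =
              (groups, cur ++ [c], cur.flatten.length + c.length)
            from by dsimp only [pvGroupStep]; rw [if_pos hfit]]
        have h := ih groups (cur ++ [c])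
        simp only [List.flatten_append, List.flatten_cons, List.flatten_nil, List.append_nil,
          List.length_append] at h
        exact h
      · rw [show pvGroupStep (groups, cur, cur.flatten.length) c =
              (groups ++ [cur], [c], c.length)
            from by dsimp only [pvGroupStep]; rw [if_neg hfit]]
        have h := ih (groups ++ [cur]) [c]
        simp only [List.flatten_cons, List.flatten_nil, List.append_nil] at h
        exact h

-- ===== VERDICT (by name: the statement is the Claim_ definition above) =====
theorem compress_sequence_spec : Claim_equal_compress_sequence := by
  intro sequence _
  show compress_sequence sequence = compress_sequence_alt sequence
  simp only [compress_sequence, compress_sequence_alt]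
  have h := fold_fusion sequence [] [] []
  simp only [List.map_nil, List.flatten_nil, List.length_nil] at h
  rw [h]
  have hlen := groupFold_len (sequence.map pvComponentB) [] []
  simp only [List.flatten_nil, List.length_nil] at hlen
  set st := (sequence.map pvComponentB).foldl pvGroupStep ([], [], 0) with hst
  by_cases hz : st.2.1.flatten = []
  · have h0 : st.2.2 = 0 := by rw [hlen, hz]; rfl
    rw [if_neg (not_not_intro hz), if_neg (not_not_intro h0)]
    simp
  · have h0 : st.2.2 ≠ 0 := by
      rw [hlen]; exact fun hh => hz (List.length_eq_zero_iff.mp hh)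
    rw [if_pos hz, if_pos h0]
    simp
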